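-- pv_equiv track=rewrite | github.com/MinsangKong/DailyProblem | 06-13/3-2.py | countBugs
-- ===== SOURCE A (Python) =====
-- def countBugs(years):
--     years = int(years)
--     bugs_history = [[1,1+3,1]]
--
--     for _year in range(2,years+1):
--         if _year%2 == 0:
--             add_bugs = sum([i[-1] for i in bugs_history if (i[1] >= _year)])
--             bugs_history.append([_year,_year+4,add_bugs])
--         else:
--             add_bugs = sum([i[-1] for i in bugs_history if (i[1] >= _year)])
--             bugs_history.append([_year,_year+3,add_bugs])
--
--     result = sum([i[-1] for i in bugs_history if i[1] > years])
--     return result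
-- ===== SOURCE B (Python) =====
-- def countBugs(years):
--     # running active-sum with end-year buckets: O(n) instead of A's O(n^2) rescans
--     years = int(years)
--     total = 1              # sum of counts of entries whose end year is >= the current year
--     expire = {4: 1}        # end year -> total count of entries ending that year
--     for y in range(2, years + 1):
--         total -= expire.get(y - 1, 0)          # entries ending in y-1 stop being active
--         add = total
--         end = y + 4 if y % 2 == 0 else y + 3
--         expire[end] = expire.get(end, 0) + add
--         total += add
--     return total - expire.get(years, 0)        # keep only entries with end year > years
-- ===== Notes on version B (the rewrite author's own statement) =====
-- stated objective: faster
-- what changed: replaces A's per-year rescan of the whole history list with a running active-sum plus a dict of end-year buckets, so each year is O(1) amortized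
import Mathlib
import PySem

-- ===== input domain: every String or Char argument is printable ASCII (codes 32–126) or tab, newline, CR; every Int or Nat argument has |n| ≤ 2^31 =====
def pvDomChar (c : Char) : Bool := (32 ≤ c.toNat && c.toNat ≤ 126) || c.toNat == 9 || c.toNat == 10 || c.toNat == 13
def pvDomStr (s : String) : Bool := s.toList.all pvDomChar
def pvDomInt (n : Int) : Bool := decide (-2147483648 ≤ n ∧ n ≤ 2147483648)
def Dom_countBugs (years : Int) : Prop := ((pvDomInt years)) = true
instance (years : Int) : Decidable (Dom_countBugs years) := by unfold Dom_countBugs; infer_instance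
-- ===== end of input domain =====

-- B replaces A's per-year rescan of the whole history with a running active-sum and
-- per-end-year buckets; same return value on every input.

-- ===== PORT A =====
-- body of A's for-loop; history entries are (start, end, count) triples
def countBugsStep (h : List (Int × Int × Int)) (y : Int) : List (Int × Int × Int) :=
  if PySem.Int.mod y 2 == 0 then
    let add := ((h.filter (fun e => decide (e.2.1 ≥ y))).map (·.2.2)).sum
    h ++ [(y, y + 4, add)]
  else
    let add := ((h.filter (fun e => decide (e.2.1 ≥ y))).map (·.2.2)).sum
    h ++ [(y, y + 3, add)]

def countBugs (years : Int) : Int :=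
  let hist := (PySem.List.pyRange 2 (years + 1) 1).foldl countBugsStep [(1, 1 + 3, 1)]
  ((hist.filter (fun e => decide (e.2.1 > years))).map (·.2.2)).sum

-- ===== PORT B =====
-- body of B's for-loop; state = (total active sum, expire buckets: end year -> count)
def countBugsAltStep (st : Int × PySem.Dict Int Int) (y : Int) : Int × PySem.Dict Int Int :=
  let total := st.1 - st.2.getD (y - 1) 0
  let add := total
  let e := if PySem.Int.mod y 2 == 0 then y + 4 else y + 3
  (total + add, st.2.insert e (st.2.getD e 0 + add))

def countBugs_alt (years : Int) : Int :=
  let st := (PySem.List.pyRange 2 (years + 1) 1).foldl countBugsAltStep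
      (1, PySem.Dict.ofList [(4, 1)])
  st.1 - st.2.getD years 0

-- ===== PRECONDITION & SPEC =====
def Spec_countBugs (years : Int) (out : Int) : Prop := out = countBugs_alt years
instance (years : Int) (out : Int) : Decidable (Spec_countBugs years out) := by unfold Spec_countBugs; infer_instance

-- ===== CLAIM (what is proved, stated in full; the proofs are below) =====
def Claim_equal_countBugs : Prop := ∀ (years : Int), Dom_countBugs years → Spec_countBugs years (countBugs years)

-- ===== LEMMAS AND PROOFS =====

-- sum of counts of entries still active at year y (what A's inner comprehension computes)
def pvActive (h : List (Int × Int × Int)) (y : Int) : Int :=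
  ((h.filter (fun e => decide (e.2.1 ≥ y))).map (·.2.2)).sum

-- sum of counts of entries ending exactly at year k (what one of B's buckets holds)
def pvBucket (h : List (Int × Int × Int)) (k : Int) : Int :=
  ((h.filter (fun e => e.2.1 == k)).map (·.2.2)).sum

theorem pvActive_split (h : List (Int × Int × Int)) (y : Int) :
    pvActive h y = pvBucket h y + pvActive h (y + 1) := by
  induction h with
  | nil => simp [pvActive, pvBucket]
  | cons a t ih =>
    rcases a with ⟨s, e, c⟩
    simp only [pvActive, pvBucket, List.filter_cons, decide_eq_true_eq, beq_iff_eq] at *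
    split_ifs with h1 h2 h3 h2 h3 <;> (try simp only [List.map_cons, List.sum_cons]) <;> omega

theorem pvActive_append (h h' : List (Int × Int × Int)) (y : Int) :
    pvActive (h ++ h') y = pvActive h y + pvActive h' y := by
  simp [pvActive, List.filter_append]

theorem pvBucket_append (h h' : List (Int × Int × Int)) (k : Int) :
    pvBucket (h ++ h') k = pvBucket h k + pvBucket h' k := by
  simp [pvBucket, List.filter_append]

theorem pvBucket_init (k : Int) : pvBucket [(1, 1 + 3, 1)] k = if k = 4 then 1 else 0 := by
  by_cases hk : k = 4
  · subst hk; simp [pvBucket]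
  · simp [pvBucket, beq_iff_eq, show ¬ ((4:Int) = k) from fun h => hk h.symm, hk]

theorem pvGetD_init (k : Int) :
    (PySem.Dict.ofList [((4 : Int), (1 : Int))]).getD k 0 = if k = 4 then 1 else 0 := by
  have h : PySem.Dict.ofList [((4 : Int), (1 : Int))] = PySem.Dict.empty.insert 4 1 := by decide
  rw [h, PySem.Dict.getD_insert]
  simp [PySem.Dict.getD_empty]

-- invariant: after both loops have run over range(2, 2+n), B's total is A's active sum
-- at year 1+n, and B's dict holds A's per-end-year bucket sums
theorem pvInv (n : Nat) :
    (((PySem.List.pyRange 2 (2 + n) 1).foldl countBugsAltStep (1, PySem.Dict.ofList [(4, 1)])).1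
       = pvActive ((PySem.List.pyRange 2 (2 + n) 1).foldl countBugsStep [(1, 1 + 3, 1)]) (1 + n))
    ∧ (∀ k, ((PySem.List.pyRange 2 (2 + n) 1).foldl countBugsAltStep (1, PySem.Dict.ofList [(4, 1)])).2.getD k 0
       = pvBucket ((PySem.List.pyRange 2 (2 + n) 1).foldl countBugsStep [(1, 1 + 3, 1)]) k) := by
  induction n with
  | zero =>
    have h0 : PySem.List.pyRange 2 (2 + (0:Nat)) 1 = [] :=
      PySem.List.pyRange_one_eq_nil (by norm_num)
    rw [h0]
    simp only [List.foldl_nil]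
    refine ⟨by norm_num [pvActive], fun k => by rw [pvGetD_init, pvBucket_init]⟩
  | succ n ih =>
    obtain ⟨ih1, ih2⟩ := ih
    have hsplit : PySem.List.pyRange 2 (2 + ((n + 1 : Nat) : Int)) 1
        = PySem.List.pyRange 2 (2 + n) 1 ++ [(2 + n : Int)] := by
      have h := PySem.List.pyRange_one_succ_right (a := 2) (b := (2 + n : Int)) (by omega)
      rw [show ((2:Int) + ((n + 1 : Nat) : Int)) = (2 + (n:Int)) + 1 by push_cast; ring, h]
    set hA := (PySem.List.pyRange 2 (2 + (n:Int)) 1).foldl countBugsStep [(1, 1 + 3, 1)] with hAdef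
    set st := (PySem.List.pyRange 2 (2 + (n:Int)) 1).foldl countBugsAltStep (1, PySem.Dict.ofList [(4, 1)]) with stdef
    rw [hsplit, List.foldl_append, List.foldl_append, ← hAdef, ← stdef]
    simp only [List.foldl_cons, List.foldl_nil]
    set y : Int := (2 + n : Int) with ydef
    have hcast : (1 : Int) + ((n + 1 : Nat) : Int) = y := by rw [ydef]; push_cast; ring
    have hadd : st.1 - st.2.getD (y - 1) 0 = pvActive hA y := by
      rw [ih1, ih2, show y - 1 = 1 + (n:Int) by rw [ydef]; ring]
      have h := pvActive_split hA (1 + n)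
      rw [show (1 + (n:Int)) + 1 = y by rw [ydef]; ring] at h
      omega
    have hAstep : countBugsStep hA y
        = hA ++ [(y, (if PySem.Int.mod y 2 == 0 then y + 4 else y + 3), pvActive hA y)] := by
      unfold countBugsStep pvActive
      split <;> simp
    have hBstep : countBugsAltStep st y
        = (pvActive hA y + pvActive hA y,
           st.2.insert (if PySem.Int.mod y 2 == 0 then y + 4 else y + 3)
             (st.2.getD (if PySem.Int.mod y 2 == 0 then y + 4 else y + 3) 0 + pvActive hA y)) := by
      unfold countBugsAltStep
      rw [hadd]
    rw [hAstep, hBstep]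
    set e : Int := if PySem.Int.mod y 2 == 0 then y + 4 else y + 3 with edef
    have he : y ≤ e := by rw [edef]; split <;> omega
    constructor
    · show pvActive hA y + pvActive hA y = pvActive (hA ++ [(y, e, pvActive hA y)]) (1 + ((n + 1 : Nat) : Int))
      rw [hcast, pvActive_append]
      have h1 : pvActive [(y, e, pvActive hA y)] y = pvActive hA y := by
        unfold pvActive
        rw [List.filter_cons_of_pos (by simpa using he)]
        simp
      omega
    · intro k
      rw [pvBucket_append]
      have hsingle : pvBucket [(y, e, pvActive hA y)] k
          = if k = e then pvActive hA y else 0 := by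
        by_cases hk : k = e
        · subst hk; simp [pvBucket]
        · unfold pvBucket
          rw [List.filter_cons_of_neg (by simpa [beq_iff_eq] using fun h => hk h.symm),
            if_neg hk]
          simp
      rw [PySem.Dict.getD_insert, hsingle]
      by_cases hk : k = e
      · rw [if_pos hk, if_pos hk, hk, ih2]
      · rw [if_neg hk, if_neg hk, ih2]
        omega

-- ===== VERDICT (by name: the statement is the Claim_ definition above) =====
theorem countBugs_spec : Claim_equal_countBugs := by
  intro years _
  show countBugs years = countBugs_alt years
  by_cases hy : 1 ≤ years
  · obtain ⟨n, hn⟩ : ∃ n : Nat, years = 1 + n := ⟨(years - 1).toNat, by omega⟩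
    subst hn
    have h2 : (1 + (n : Int)) + 1 = 2 + n := by ring
    obtain ⟨i1, i2⟩ := pvInv n
    unfold countBugs countBugs_alt
    simp only [h2]
    rw [i1, i2]
    set hA := (PySem.List.pyRange 2 (2 + (n:Int)) 1).foldl countBugsStep [(1, 1 + 3, 1)] with hAdef
    have hgt : ((hA.filter (fun e => decide (e.2.1 > (1 + (n:Int))))).map (·.2.2)).sum
        = pvActive hA ((1 + (n:Int)) + 1) := by
      have hpred : (fun (e : Int × Int × Int) => decide (e.2.1 > (1 + (n:Int))))
          = (fun (e : Int × Int × Int) => decide (e.2.1 ≥ (1 + (n:Int)) + 1)) := by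
        funext e
        simp only [decide_eq_decide]
        omega
      unfold pvActive
      rw [hpred]
    rw [hgt]
    have h := pvActive_split hA (1 + n)
    omega
  · have hnil : PySem.List.pyRange 2 (years + 1) 1 = [] :=
      PySem.List.pyRange_one_eq_nil (by omega)
    unfold countBugs countBugs_alt
    rw [hnil]
    simp only [List.foldl_nil]
    rw [pvGetD_init, if_neg (by omega)]
    rw [List.filter_cons_of_pos (by simp; omega)]
    simp
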